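-- pv_equiv track=rewrite | github.com/GanMut/Evolution_of_trehalose | ortholog_finder.py | potentialSubworker
-- ===== SOURCE A (Python) =====
-- def potentialSubworker(_dict_: dict):
-- 	result = {}
-- 	for i, v in _dict_.items():
-- 		_=i.split(':')[0]
-- 		if _ in result.keys():
-- 			result[_].update({i:v})
-- 		else:
-- 			result[_] = {i:v}
-- 	return result
-- ===== SOURCE B (Python) =====
-- def potentialSubworker(_dict_: dict):
--     prefixes = dict.fromkeys(k.split(':')[0] for k in _dict_)
--     return {p: {i: v for i, v in _dict_.items() if i.split(':')[0] == p}
--             for p in prefixes}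
-- ===== Notes on version B (the rewrite author's own statement) =====
-- stated objective: simpler
-- what changed: A builds the result in one scan with a membership test and in-place inner-dict updates; B first deduplicates the prefixes in first-occurrence order with dict.fromkeys and then builds the whole result as one nested filtering comprehension (one filtering pass per prefix).
import Mathlib
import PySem

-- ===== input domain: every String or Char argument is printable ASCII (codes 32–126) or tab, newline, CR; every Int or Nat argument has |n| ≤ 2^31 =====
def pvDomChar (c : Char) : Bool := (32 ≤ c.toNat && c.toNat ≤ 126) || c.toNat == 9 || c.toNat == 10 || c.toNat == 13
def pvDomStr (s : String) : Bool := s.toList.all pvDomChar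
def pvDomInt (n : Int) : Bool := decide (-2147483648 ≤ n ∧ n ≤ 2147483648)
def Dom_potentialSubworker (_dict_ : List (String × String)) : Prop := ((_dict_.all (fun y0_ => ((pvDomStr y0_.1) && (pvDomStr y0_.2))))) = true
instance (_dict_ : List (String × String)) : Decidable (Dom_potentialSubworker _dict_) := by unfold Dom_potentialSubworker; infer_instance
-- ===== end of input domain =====

-- B replaces A's single-pass membership-test/update loop by an ordered dedup of the
-- prefixes followed by one filtering pass per prefix (objective: simpler).

-- shared helper: i.split(':')[0] — the separator is nonempty, so split? is some and the
-- list is nonempty, hence the defaults of getD/pyGetD are never reached (exact)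
def pvPrefix (s : String) : String :=
  PySem.List.pyGetD ((PySem.Str.split? s ":").getD []) 0 ""

-- ===== PORT A =====
-- the loop body of A ('for i, v in _dict_.items(): …')
def pvStepA (result : PySem.Dict String (PySem.Dict String String)) (iv : String × String) :
    PySem.Dict String (PySem.Dict String String) :=
  let u := pvPrefix iv.1
  if result.contains u then
    -- result[_].update({i: v}); the key is present, so modify's default is never used
    result.modify u PySem.Dict.empty (fun d => d.update [(iv.1, iv.2)])
  else
    -- result[_] = {i: v}
    result.insert u (PySem.Dict.ofList [(iv.1, iv.2)])

def potentialSubworker (_dict_ : List (String × String)) : List (String × List (String × String)) :=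
  ((_dict_.foldl pvStepA PySem.Dict.empty).items).map (fun q => (q.1, q.2.items))

-- ===== PORT B =====
-- the inner comprehension's step: insert (i, v) when i.split(':')[0] == p
def pvIns (p : String) (d : PySem.Dict String String) (e : String × String) :
    PySem.Dict String String :=
  if pvPrefix e.1 == p then d.insert e.1 e.2 else d

def potentialSubworker_alt (_dict_ : List (String × String)) : List (String × List (String × String)) :=
  let prefixes := PySem.List.dedup (_dict_.map (fun e => pvPrefix e.1))
  (prefixes.foldl
    (fun (r : PySem.Dict String (List (String × String))) p =>
      r.insert p (_dict_.foldl (pvIns p) PySem.Dict.empty).items)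
    PySem.Dict.empty).items

-- ===== PRECONDITION & SPEC =====
def Spec_potentialSubworker (_dict_ : List (String × String)) (out : List (String × List (String × String))) : Prop := out = potentialSubworker_alt _dict_
instance (_dict_ : List (String × String)) (out : List (String × List (String × String))) : Decidable (Spec_potentialSubworker _dict_ out) := by unfold Spec_potentialSubworker; infer_instance

-- ===== CLAIM (what is proved, stated in full; the proofs are below) =====
def Claim_equal_potentialSubworker : Prop := ∀ (_dict_ : List (String × String)), Dom_potentialSubworker _dict_ → Spec_potentialSubworker _dict_ (potentialSubworker _dict_)

-- ===== LEMMAS AND PROOFS =====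

-- the prefixes of l that are not yet keys in ks, in first-occurrence order
def pvNewKeys (l ks : List String) : List String :=
  (PySem.Set.ofList l).filter (fun y => !(ks.contains y))

lemma pvNewKeys_nil (ks : List String) : pvNewKeys [] ks = [] := rfl

lemma pvNewKeys_cons_mem (u : String) (l ks : List String) (h : u ∈ ks) :
    pvNewKeys (u :: l) ks = pvNewKeys l ks := by
  simp only [pvNewKeys, PySem.Set.ofList_cons, List.filter_cons, PySem.Set.discard,
    List.filter_filter]
  rw [if_neg (by simp [h])]
  apply List.filter_congr
  intro y _
  by_cases hy : y = u
  · simp [hy, h]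
  · simp [hy]

lemma pvNewKeys_cons_not_mem (u : String) (l ks : List String) (h : u ∉ ks) :
    pvNewKeys (u :: l) ks = u :: pvNewKeys l (ks ++ [u]) := by
  simp only [pvNewKeys, PySem.Set.ofList_cons, List.filter_cons, PySem.Set.discard,
    List.filter_filter]
  rw [if_pos (by simp [h])]
  congr 1
  apply List.filter_congr
  intro y _
  by_cases hy : y = u
  · simp [hy]
  · simp [hy, Bool.and_comm]

lemma pvNewKeys_not_mem {l ks : List String} {p : String} (h : p ∈ pvNewKeys l ks) :
    p ∉ ks := by
  simp only [pvNewKeys, List.mem_filter] at h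
  simpa using h.2

-- invariant of A's loop: the accumulator's groups get extended entrywise, and the
-- prefixes not yet present are appended with their full groups
lemma pvMain (xs : List (String × String)) :
    ∀ (acc : PySem.Dict String (PySem.Dict String String)), acc.keys.Nodup →
      (xs.foldl pvStepA acc).items
        = acc.items.map (fun q => (q.1, xs.foldl (pvIns q.1) q.2))
          ++ (pvNewKeys (xs.map (fun e => pvPrefix e.1)) acc.keys).map
               (fun p => (p, xs.foldl (pvIns p) PySem.Dict.empty)) := by
  induction xs with
  | nil => intro acc _; simp [pvNewKeys_nil]
  | cons e t ih =>
    intro acc hnd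
    by_cases hc : acc.contains (pvPrefix e.1) = true
    · -- the prefix is already a key: A updates in place
      have hmem : pvPrefix e.1 ∈ acc.keys := (PySem.Dict.contains_iff_mem_keys _ _).1 hc
      have hstep : pvStepA acc e
          = acc.modify (pvPrefix e.1) PySem.Dict.empty (fun d => d.update [(e.1, e.2)]) := by
        simp [pvStepA, hc]
      have hnd' : (pvStepA acc e).keys.Nodup := by
        rw [hstep]; simpa [PySem.Dict.modify, PySem.Dict.keys_insert_of_contains _ _ hc]
          using hnd
      have hkeq : (pvStepA acc e).keys = acc.keys := by
        rw [hstep]; simp [PySem.Dict.modify, PySem.Dict.keys_insert_of_contains _ _ hc]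
      rw [List.foldl_cons, ih _ hnd', hkeq]
      congr 1
      · -- entrywise: modifying key u then folding t = folding (e :: t)
        rw [hstep]
        simp only [PySem.Dict.modify, PySem.Dict.items_insert_of_contains _ _ hc, List.map_map]
        apply List.map_congr_left
        intro q hq
        by_cases hq1 : q.1 = pvPrefix e.1
        · have hget : acc.getD (pvPrefix e.1) PySem.Dict.empty = q.2 := by
            exact PySem.Dict.getD_of_mem_items _ (by rw [← hq1]; exact hq) hnd _
          simp only [Function.comp_apply, hq1, beq_self_eq_true, if_pos]
          simp [List.foldl_cons, pvIns, hget, PySem.Dict.update]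
        · have : (q.1 == pvPrefix e.1) = false := by simpa using hq1
          simp only [Function.comp_apply, this, Bool.false_eq_true, if_false]
          simp [List.foldl_cons, pvIns, Ne.symm hq1]
      · -- new keys: the current prefix is not new, groups unchanged
        rw [List.map_cons, pvNewKeys_cons_mem _ _ _ hmem]
        apply List.map_congr_left
        intro p hp
        have hne : pvPrefix e.1 ≠ p := by
          intro hh; exact (pvNewKeys_not_mem hp) (hh ▸ hmem)
        simp [List.foldl_cons, pvIns, hne]
    · -- a fresh prefix: A appends a new singleton group
      have hc' : acc.contains (pvPrefix e.1) = false := by simpa using hc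
      have hnm : pvPrefix e.1 ∉ acc.keys := fun h =>
        hc ((PySem.Dict.contains_iff_mem_keys _ _).2 h)
      have hstep : pvStepA acc e
          = acc.insert (pvPrefix e.1) (PySem.Dict.ofList [(e.1, e.2)]) := by
        simp [pvStepA, hc']
      have hkeq : (pvStepA acc e).keys = acc.keys ++ [pvPrefix e.1] := by
        rw [hstep]; exact PySem.Dict.keys_insert_of_not_contains _ _ hc'
      have hnd' : (pvStepA acc e).keys.Nodup := by
        rw [hkeq]
        simp [List.nodup_append, hnd]
        intro a ha hb; exact hnm (hb ▸ ha)
      have hitems : (pvStepA acc e).items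
          = acc.items ++ [(pvPrefix e.1, PySem.Dict.ofList [(e.1, e.2)])] := by
        rw [hstep]; exact PySem.Dict.items_insert_of_not_contains _ _ hc'
      rw [List.foldl_cons, ih _ hnd', hkeq, hitems]
      rw [List.map_cons, pvNewKeys_cons_not_mem _ _ _ hnm]
      simp only [List.map_append, List.map_cons, List.map_nil, List.append_assoc]
      -- old entries: their keys differ from the new prefix
      have hold : acc.items.map (fun q => (q.1, List.foldl (pvIns q.1) q.2 t))
          = acc.items.map (fun q => (q.1, List.foldl (pvIns q.1) q.2 (e :: t))) := by
        apply List.map_congr_left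
        intro q hq
        have hq1 : q.1 ≠ pvPrefix e.1 := by
          intro hh
          exact hnm (hh ▸ (List.mem_map_of_mem hq : q.1 ∈ acc.items.map Prod.fst))
        simp [List.foldl_cons, pvIns, Ne.symm hq1]
      -- the new group starts from the singleton {i: v}
      have hhead : List.foldl (pvIns (pvPrefix e.1)) (PySem.Dict.ofList [(e.1, e.2)]) t
          = List.foldl (pvIns (pvPrefix e.1)) PySem.Dict.empty (e :: t) := by
        simp [List.foldl_cons, pvIns, PySem.Dict.ofList, PySem.Dict.update]
      -- strictly newer keys differ from the new prefix
      have htail : (pvNewKeys (t.map (fun e => pvPrefix e.1)) (acc.keys ++ [pvPrefix e.1])).map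
            (fun p => (p, List.foldl (pvIns p) PySem.Dict.empty t))
          = (pvNewKeys (t.map (fun e => pvPrefix e.1)) (acc.keys ++ [pvPrefix e.1])).map
            (fun p => (p, List.foldl (pvIns p) PySem.Dict.empty (e :: t))) := by
        apply List.map_congr_left
        intro p hp
        have hne : pvPrefix e.1 ≠ p := by
          intro hh
          exact (pvNewKeys_not_mem hp) (by simp [← hh])
        simp [List.foldl_cons, pvIns, hne]
      rw [hold, hhead, htail]
      simp

-- A's result, characterised
lemma pvA_eq (xs : List (String × String)) :
    potentialSubworker xs
      = (PySem.List.dedup (xs.map (fun e => pvPrefix e.1))).map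
          (fun p => (p, (xs.foldl (pvIns p) PySem.Dict.empty).items)) := by
  have h := pvMain xs PySem.Dict.empty (by simp [PySem.Dict.keys_empty (κ := String) (ν := PySem.Dict String String)])
  simp only [potentialSubworker, h]
  simp [pvNewKeys, PySem.List.dedup, PySem.Dict.empty, PySem.Dict.keys, List.map_map, Function.comp]

-- a fold inserting distinct fresh keys from empty just lists the pairs
lemma pvOuterFold (l : List String) (f : String → List (String × String)) (hnd : l.Nodup) :
    (l.foldl (fun (r : PySem.Dict String (List (String × String))) p => r.insert p (f p))
        PySem.Dict.empty).items
      = l.map (fun p => (p, f p)) := by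
  have h := PySem.Dict.items_foldl_insert_fresh l (fun p => p) f PySem.Dict.empty
    (fun a _ => by simp [PySem.Dict.contains_empty]) (by simpa [List.map_id'] using hnd)
  simpa using h

-- B's result, characterised: the outer fold inserts fresh distinct keys, so it appends
lemma pvB_eq (xs : List (String × String)) :
    potentialSubworker_alt xs
      = (PySem.List.dedup (xs.map (fun e => pvPrefix e.1))).map
          (fun p => (p, (xs.foldl (pvIns p) PySem.Dict.empty).items)) := by
  exact pvOuterFold _ _ (PySem.Set.nodup_ofList _)

-- ===== VERDICT (by name: the statement is the Claim_ definition above) =====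
theorem potentialSubworker_spec : Claim_equal_potentialSubworker := by
  intro xs _
  unfold Spec_potentialSubworker
  rw [pvA_eq, pvB_eq]
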